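-- pv_equiv track=rewrite | github.com/ioi-germany/cms | cmscontrib/gerpythonformat/Messenger.py | generic_split
-- ===== SOURCE A (Python) =====
-- def generic_split(s, first=0, max_len=-1):
--     """Estimate the length of a string when displayed in a terminal.
--     The basic ANSI formatting commands are skipped (but for example \n and \t
--     are counted as one character).
--
--     s (unicode): the string
--
--     return (int): its length
--
--     """
--     r = 0
--     t = []
--     skip = False
--
--     for i in range(first, len(s)):
--         c = s[i]
--         t.append(c)
--
--         if c == '\033':
--             skip = True
--
--         if not skip:
--             r += 1
--
--         if c == 'm' or c == 'K':
--             skip = False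
--
--         if r > max_len >= 0:
--             t = t[:-1]
--             break
--
--     return "".join(t), r
-- ===== SOURCE B (Python) =====
-- def generic_split(s, first=0, max_len=-1):
--     n = len(s)
--     r = 0
--     buf = []
--     i = first
--     while i < n:
--         if s[i] == '\033':
--             # consume the whole escape sequence (through the first 'm'/'K',
--             # or to the end of the string) uncounted
--             while i < n:
--                 ch = s[i]
--                 buf.append(ch)
--                 i += 1
--                 if ch == 'm' or ch == 'K':
--                     break
--         else:
--             r += 1
--             if 0 <= max_len < r:
--                 break
--             buf.append(s[i])
--             i += 1
--     return "".join(buf), r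
-- ===== Notes on version B (the rewrite author's own statement) =====
-- stated objective: alternative
-- what changed: Replaces A's single for-loop with a sticky skip flag by a two-level index loop that consumes each ANSI escape sequence as a whole chunk via an inner scan (through the first 'm'/'K' or to end of string), counting only visible characters and breaking before appending the over-limit character.
import Mathlib
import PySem

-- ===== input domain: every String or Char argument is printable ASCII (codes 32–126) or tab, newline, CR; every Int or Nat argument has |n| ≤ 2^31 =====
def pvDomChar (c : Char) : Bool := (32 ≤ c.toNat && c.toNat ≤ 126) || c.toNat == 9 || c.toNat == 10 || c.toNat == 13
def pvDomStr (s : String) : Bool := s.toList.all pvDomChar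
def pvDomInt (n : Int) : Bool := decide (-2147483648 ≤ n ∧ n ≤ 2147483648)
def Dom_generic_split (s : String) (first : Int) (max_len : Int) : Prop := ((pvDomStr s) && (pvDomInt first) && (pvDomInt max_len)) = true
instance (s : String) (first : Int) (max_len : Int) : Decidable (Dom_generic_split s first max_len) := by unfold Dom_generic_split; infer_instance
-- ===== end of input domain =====

-- B replaces A's sticky skip flag with chunk-consumption of each escape sequence via an
-- inner scan (objective: alternative decomposition, same cost).

-- ===== PORT A =====
-- A's for-loop over range(first, len(s)) with state (r, t, skip) and break.
-- The fuel argument ((n - i).toNat at entry) only makes the recursion structural: the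
-- loop exits at i ≥ n before fuel can run out. The `none` branch of pyGet? is Python's
-- IndexError path (excluded by Pre_).
def aLoop (cs : List Char) (n maxLen : Int) : Nat → Int → Int → List Char → Bool → List Char × Int
  | 0, _, r, t, _ => (t, r)
  | fuel + 1, i, r, t, skip =>
    if i < n then
      match PySem.List.pyGet? cs i with
      | none => (t, r)
      | some c =>
        let t' := t ++ [c]
        let skip1 := if c = '\x1b' then true else skip
        let r' := if skip1 = false then r + 1 else r
        let skip2 := if c = 'm' ∨ c = 'K' then false else skip1
        if r' > maxLen ∧ maxLen ≥ 0 then (t, r')  -- t = t'[:-1], break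
        else aLoop cs n maxLen fuel (i + 1) r' t' skip2
    else (t, r)

def generic_split (s : String) (first : Int) (max_len : Int) : String × Int :=
  let cs := s.toList
  let n : Int := (cs.length : Int)
  let p := aLoop cs n max_len (n - first).toNat first 0 [] false
  (String.ofList p.1, p.2)

-- ===== PORT B =====
-- inner while of B: consume chars of the escape sequence (uncounted) through the
-- first 'm'/'K' or to the end; returns (buffer, next index). Fuel as above.
-- `none` = Python IndexError path (outside Pre_); it ends the scan so B stays total.
def bScan (cs : List Char) (n : Int) : Nat → Int → List Char → List Char × Int
  | 0, i, buf => (buf, i)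
  | fuel + 1, i, buf =>
    if i < n then
      match PySem.List.pyGet? cs i with
      | none => (buf, n)
      | some ch =>
        if ch = 'm' ∨ ch = 'K' then (buf ++ [ch], i + 1)
        else bScan cs n fuel (i + 1) (buf ++ [ch])
    else (buf, i)

-- B's outer while loop with explicit index i, visible counter r and buffer.
def bLoop (cs : List Char) (n maxLen : Int) : Nat → Int → Int → List Char → List Char × Int
  | 0, _, r, buf => (buf, r)
  | fuel + 1, i, r, buf =>
    if i < n then
      match PySem.List.pyGet? cs i with
      | none => (buf, r)
      | some c =>
        if c = '\x1b' then
          let p := bScan cs n (fuel + 1) i buf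
          bLoop cs n maxLen fuel p.2 r p.1
        else
          let r' := r + 1
          if 0 ≤ maxLen ∧ maxLen < r' then (buf, r')
          else bLoop cs n maxLen fuel (i + 1) r' (buf ++ [c])
    else (buf, r)

def generic_split_alt (s : String) (first : Int) (max_len : Int) : String × Int :=
  let cs := s.toList
  let n : Int := (cs.length : Int)
  let p := bLoop cs n max_len (n - first).toNat first 0 []
  (String.ofList p.1, p.2)

-- ===== PRECONDITION & SPEC =====
-- Pre_ excludes exactly the inputs first < -len(s), where Python A (and B) raise IndexError.
def Pre_generic_split (s : String) (first : Int) (max_len : Int) : Prop :=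
  -(s.length : Int) ≤ first
instance (s : String) (first : Int) (max_len : Int) : Decidable (Pre_generic_split s first max_len) := by unfold Pre_generic_split; infer_instance

def pvWitness_generic_split : String × Int × Int := ("ab", 0, 1)

def Spec_generic_split (s : String) (first : Int) (max_len : Int) (out : String × Int) : Prop := out = generic_split_alt s first max_len
instance (s : String) (first : Int) (max_len : Int) (out : String × Int) : Decidable (Spec_generic_split s first max_len out) := by unfold Spec_generic_split; infer_instance

-- ===== CLAIM (what is proved, stated in full; the proofs are below) =====
def Claim_equal_generic_split : Prop := ∀ (s : String) (first : Int) (max_len : Int), Dom_generic_split s first max_len → Pre_generic_split s first max_len → Spec_generic_split s first max_len (generic_split s first max_len)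

-- ===== LEMMAS AND PROOFS =====

-- Core equivalence of the two loops, by induction on A's fuel.
-- The invariant (0 ≤ maxLen → r ≤ maxLen) reflects that A breaks the moment r
-- exceeds maxLen, so the break test is never true while skipping; the fuel bounds
-- say each loop has enough fuel to run to i ≥ n.
theorem loops_eq (cs : List Char) (n maxLen : Int) :
    ∀ (fa : Nat),
      (∀ (fb : Nat) (i r : Int) (t : List Char),
        (n - i).toNat ≤ fa → (n - i).toNat ≤ fb → (0 ≤ maxLen → r ≤ maxLen) →
        aLoop cs n maxLen fa i r t false = bLoop cs n maxLen fb i r t) ∧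
      (∀ (fb fs : Nat) (i r : Int) (t : List Char),
        (n - i).toNat ≤ fa → (n - i).toNat ≤ fs → (n - i).toNat ≤ fb + 1 →
        (0 ≤ maxLen → r ≤ maxLen) →
        aLoop cs n maxLen fa i r t true =
          bLoop cs n maxLen fb (bScan cs n fs i t).2 r (bScan cs n fs i t).1) := by
  intro fa
  induction fa with
  | zero =>
    constructor
    · intro fb i r t hfa hfb hr
      have hi : ¬ i < n := by omega
      cases fb <;> simp [aLoop, bLoop, hi]
    · intro fb fs i r t hfa hfs hfb hr
      have hi : ¬ i < n := by omega
      cases fs <;> cases fb <;> simp [aLoop, bLoop, bScan, hi]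
  | succ fa ih =>
    constructor
    · -- skip = false case
      intro fb i r t hfa hfb hr
      by_cases hi : i < n
      · obtain ⟨fb', rfl⟩ : ∃ fb', fb = fb' + 1 := ⟨fb - 1, by omega⟩
        cases hg : PySem.List.pyGet? cs i with
        | none => simp [aLoop, bLoop, hi, hg]
        | some c =>
          by_cases hesc : c = '\x1b'
          · subst hesc
            have hnb : ¬ (r > maxLen ∧ maxLen ≥ 0) := by omega
            simpa [aLoop, bLoop, bScan, hi, hg, hnb] using
              ih.2 fb' fb' (i + 1) r (t ++ ['\x1b']) (by omega) (by omega) (by omega) hr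
          · by_cases hbrk : r + 1 > maxLen ∧ maxLen ≥ 0
            · have h1 : 0 ≤ maxLen ∧ maxLen ≤ r := by omega
              have h2 : maxLen ≤ r ∧ 0 ≤ maxLen := by omega
              simp [aLoop, bLoop, hi, hg, hesc, h1, h2]
            · have h1 : ¬ (0 ≤ maxLen ∧ maxLen ≤ r) := by omega
              have h2 : ¬ (maxLen ≤ r ∧ 0 ≤ maxLen) := by omega
              simpa [aLoop, bLoop, hi, hg, hesc, h1, h2] using
                ih.1 fb' (i + 1) (r + 1) (t ++ [c]) (by omega) (by omega) (by omega)
      · cases fb <;> simp [aLoop, bLoop, hi]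
    · -- skip = true case
      intro fb fs i r t hfa hfs hfb hr
      by_cases hi : i < n
      · obtain ⟨fs', rfl⟩ : ∃ fs', fs = fs' + 1 := ⟨fs - 1, by omega⟩
        cases hg : PySem.List.pyGet? cs i with
        | none =>
          cases fb <;> simp [aLoop, bLoop, bScan, hi, hg]
        | some c =>
          have hnb : ¬ (r > maxLen ∧ maxLen ≥ 0) := by omega
          by_cases hmk : c = 'm' ∨ c = 'K'
          · rcases hmk with h | h
            · subst h
              simpa [aLoop, bLoop, bScan, hi, hg, hnb] using
                ih.1 fb (i + 1) r (t ++ ['m']) (by omega) (by omega) hr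
            · subst h
              simpa [aLoop, bLoop, bScan, hi, hg, hnb] using
                ih.1 fb (i + 1) r (t ++ ['K']) (by omega) (by omega) hr
          · simpa [aLoop, bLoop, bScan, hi, hg, hmk, hnb] using
              ih.2 fb fs' (i + 1) r (t ++ [c]) (by omega) (by omega) (by omega) hr
      · cases fs <;> cases fb <;> simp [aLoop, bLoop, bScan, hi]

-- ===== VERDICT (by name: the statement is the Claim_ definition above) =====
theorem generic_split_spec : Claim_equal_generic_split := by
  intro s first max_len _ _
  unfold Spec_generic_split generic_split generic_split_alt
  have h := (loops_eq s.toList ((s.toList.length : Int)) max_len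
      (((s.toList.length : Int) - first).toNat)).1
      (((s.toList.length : Int) - first).toNat) first 0 []
      (le_refl _) (le_refl _) (by intro h; omega)
  simp only [h]
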